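-- pv_equiv track=rewrite | github.com/umarmughal824/micromasters | profiles/util.py | split_at_space
-- ===== SOURCE A (Python) =====
-- def split_at_space(string, max_length=40):
--     """
--     Split a string into two parts. The split must occur at a whitespace
--     character, and the max_length of the first part is set with the
--     `max_length` argument. This is used for splitting the user's
--     `address` field into `address1`, `address2`, and `address3`.
--     """
--     if len(string) <= max_length:
--         return string, ""
--     last_index = 0
--     for index, char in enumerate(string):
--         if char.isspace():
--             if index > max_length:
--                 return string[0:last_index], string[last_index:]
--             last_index = index
--     return string[0:last_index], string[last_index:]
-- ===== SOURCE B (Python) =====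
-- def split_at_space(string, max_length=40):
--     """Split at the last whitespace at index <= max_length (0 if none)."""
--     if len(string) <= max_length:
--         return string, ""
--     idx = 0
--     for i in range(max_length, 0, -1):
--         if string[i].isspace():
--             idx = i
--             break
--     return string[:idx], string[idx:]
-- ===== Notes on version B (the rewrite author's own statement) =====
-- stated objective: simpler
-- what changed: Replaces A's forward scan over enumerate(string) carrying a last_index accumulator with an early return with a stateless backward scan from index max_length that breaks at the first whitespace, then slices once.
import Mathlib
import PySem

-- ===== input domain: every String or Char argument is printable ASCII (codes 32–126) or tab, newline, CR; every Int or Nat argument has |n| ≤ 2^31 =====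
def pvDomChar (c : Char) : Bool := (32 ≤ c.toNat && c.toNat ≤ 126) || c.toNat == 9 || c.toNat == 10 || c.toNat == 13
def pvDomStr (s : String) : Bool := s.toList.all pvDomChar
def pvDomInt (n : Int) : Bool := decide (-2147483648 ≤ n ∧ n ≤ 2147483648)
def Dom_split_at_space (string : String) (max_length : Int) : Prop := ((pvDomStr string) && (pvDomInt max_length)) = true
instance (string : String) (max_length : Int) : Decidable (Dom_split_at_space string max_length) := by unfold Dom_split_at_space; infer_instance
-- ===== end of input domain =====

-- B replaces A's forward accumulate-last-whitespace scan with a stateless backward scan from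
-- max_length for the first whitespace (objective: simpler decomposition, same result).

-- ===== PORT A =====
-- A's for-loop over enumerate(string) with state last_index and an early return.
def pvALoop (s : String) (M : Int) : List (Int × Char) → Int → String × String
  | [], li => (PySem.Str.slice s (some 0) (some li), PySem.Str.slice s (some li) none)
  | (i, c) :: rest, li =>
      if PySem.Chars.isspace c then
        if i > M then (PySem.Str.slice s (some 0) (some li), PySem.Str.slice s (some li) none)
        else pvALoop s M rest i
      else pvALoop s M rest li

def split_at_space (string : String) (max_length : Int) : String × String :=
  if PySem.Str.len string ≤ max_length then (string, "")
  else pvALoop string max_length (PySem.List.enumerate string.toList 0) 0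

-- ===== PORT B =====
-- B's for-loop over range(max_length, 0, -1) with a break at the first whitespace.
def pvBLoop (cs : List Char) : List Int → Int
  | [] => 0
  | i :: rest =>
      if ((PySem.List.pyGet? cs i).map PySem.Chars.isspace).getD false then i
      else pvBLoop cs rest

def split_at_space_alt (string : String) (max_length : Int) : String × String :=
  if PySem.Str.len string ≤ max_length then (string, "")
  else
    let idx := pvBLoop string.toList (PySem.List.pyRange max_length 0 (-1))
    (PySem.Str.slice string none (some idx), PySem.Str.slice string (some idx) none)

-- ===== PRECONDITION & SPEC =====
def Spec_split_at_space (string : String) (max_length : Int) (out : String × String) : Prop := out = split_at_space_alt string max_length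
instance (string : String) (max_length : Int) (out : String × String) : Decidable (Spec_split_at_space string max_length out) := by unfold Spec_split_at_space; infer_instance

-- ===== CLAIM (what is proved, stated in full; the proofs are below) =====
def Claim_equal_split_at_space : Prop := ∀ (string : String) (max_length : Int), Dom_split_at_space string max_length → Spec_split_at_space string max_length (split_at_space string max_length)

-- ===== LEMMAS AND PROOFS =====

-- proof-side index function of A's loop
def aIdx (M : Int) : List (Int × Char) → Int → Int
  | [], li => li
  | (i, c) :: rest, li =>
      if PySem.Chars.isspace c then (if i > M then li else aIdx M rest i)
      else aIdx M rest li

-- proof-side: last whitespace index ≤ M in t (offset k), else li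
def lastSp (t : List Char) (k M li : Int) : Int :=
  match t with
  | [] => li
  | c :: r => if PySem.Chars.isspace c ∧ k ≤ M then lastSp r (k+1) M k else lastSp r (k+1) M li

-- M-free variant (used on the prefix whose indices are all ≤ M)
def lastSp' (t : List Char) (k li : Int) : Int :=
  match t with
  | [] => li
  | c :: r => if PySem.Chars.isspace c then lastSp' r (k+1) k else lastSp' r (k+1) li

lemma lastSp_of_lt (t : List Char) (k M li : Int) (h : M < k) : lastSp t k M li = li := by
  induction t generalizing k with
  | nil => rfl
  | cons c r ih =>
      simp only [lastSp]
      rw [if_neg (by rintro ⟨_, hk⟩; omega)]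
      exact ih (k+1) (by omega)

lemma pvALoop_eq_pair (s : String) (M : Int) (l : List (Int × Char)) (li : Int) :
    pvALoop s M l li =
      (PySem.Str.slice s (some 0) (some (aIdx M l li)), PySem.Str.slice s (some (aIdx M l li)) none) := by
  induction l generalizing li with
  | nil => rfl
  | cons p rest ih =>
      obtain ⟨i, c⟩ := p
      simp only [pvALoop, aIdx]
      split_ifs <;> simp [ih]

lemma aIdx_enumerate_eq_lastSp (M : Int) (t : List Char) (k li : Int) :
    aIdx M (PySem.List.enumerate t k) li = lastSp t k M li := by
  induction t generalizing k li with
  | nil => rfl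
  | cons c r ih =>
      rw [PySem.List.enumerate_cons]
      simp only [aIdx, lastSp]
      by_cases hs : PySem.Chars.isspace c
      · by_cases hk : k > M
        · rw [if_pos hs, if_pos hk, if_neg (by rintro ⟨_, h⟩; omega)]
          exact (lastSp_of_lt r (k+1) M li (by omega)).symm
        · rw [if_pos hs, if_neg hk, if_pos ⟨hs, by omega⟩, ih]
      · rw [if_neg hs, if_neg (by rintro ⟨h, _⟩; exact hs h), ih]

lemma lastSp_append (t r : List Char) (k M li : Int) :
    lastSp (t ++ r) k M li = lastSp r (k + t.length) M (lastSp t k M li) := by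
  induction t generalizing k li with
  | nil => simp [lastSp]
  | cons c t' ih =>
      simp only [List.cons_append, lastSp, List.length_cons]
      split_ifs <;> · rw [ih]; congr 1; push_cast; ring

lemma lastSp_eq_lastSp' (t : List Char) (k M li : Int) (h : k + t.length ≤ M + 1) :
    lastSp t k M li = lastSp' t k li := by
  induction t generalizing k li with
  | nil => rfl
  | cons c r ih =>
      simp only [lastSp, lastSp', List.length_cons] at *
      by_cases hs : PySem.Chars.isspace c
      · rw [if_pos ⟨hs, by omega⟩, if_pos hs, ih _ _ (by omega)]
      · rw [if_neg (by rintro ⟨h1, _⟩; exact hs h1), if_neg hs, ih _ _ (by omega)]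

lemma lastSp'_append_singleton (t : List Char) (c : Char) (k li : Int) :
    lastSp' (t ++ [c]) k li =
      if PySem.Chars.isspace c then k + t.length else lastSp' t k li := by
  induction t generalizing k li with
  | nil => simp [lastSp']
  | cons d t' ih =>
      simp only [List.cons_append, lastSp', List.length_cons]
      by_cases hd : PySem.Chars.isspace d <;> by_cases hc : PySem.Chars.isspace c <;>
        simp [hd, hc, ih] <;> omega

lemma pvBLoop_eq_lastSp' (cs : List Char) (m : Nat) (h : m < cs.length) :
    pvBLoop cs (PySem.List.pyRange (m : Int) 0 (-1)) = lastSp' (cs.take (m + 1)) 0 0 := by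
  induction m with
  | zero =>
      rw [PySem.List.pyRange_neg_one_eq_nil (by omega)]
      cases cs with
      | nil => simp at h
      | cons c r => simp [pvBLoop, lastSp']
  | succ n ih =>
      rw [show ((n + 1 : Nat) : Int) = (n : Int) + 1 by push_cast; ring] at *
      rw [PySem.List.pyRange_neg_one_cons (by omega)]
      have hn1 : n + 1 < cs.length := h
      have htake : cs.take (n + 1 + 1) = cs.take (n + 1) ++ [cs[n + 1]] := by
        simp [List.take_add_one, List.getElem?_eq_getElem hn1]
      rw [htake, lastSp'_append_singleton]
      have hlen : (cs.take (n + 1)).length = n + 1 := by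
        simp [List.length_take]; omega
      have hget : PySem.List.pyGet? cs ((n : Int) + 1) = some cs[n + 1] := by
        rw [show ((n : Int) + 1) = ((n + 1 : Nat) : Int) by push_cast; ring]
        rw [PySem.List.pyGet?_natCast]
        exact List.getElem?_eq_getElem hn1
      simp only [pvBLoop, hget, Option.map_some, Option.getD_some, hlen]
      by_cases hs : PySem.Chars.isspace cs[n + 1]
      · simp [hs]
      · simp [hs]
        exact ih (by omega)

lemma loops_agree (cs : List Char) (M : Int) (hM : M < (cs.length : Int)) :
    aIdx M (PySem.List.enumerate cs 0) 0 = pvBLoop cs (PySem.List.pyRange M 0 (-1)) := by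
  rw [aIdx_enumerate_eq_lastSp]
  by_cases hneg : M < 0
  · rw [PySem.List.pyRange_neg_one_eq_nil (by omega)]
    simp only [pvBLoop]
    exact lastSp_of_lt _ _ _ _ (by omega)
  · obtain ⟨m, rfl⟩ : ∃ m : Nat, M = (m : Int) := ⟨M.toNat, by omega⟩
    have hm : m < cs.length := by exact_mod_cast hM
    rw [pvBLoop_eq_lastSp' cs m hm]
    have hsplit : cs = cs.take (m + 1) ++ cs.drop (m + 1) := (List.take_append_drop _ _).symm
    conv_lhs => rw [hsplit]
    rw [lastSp_append]
    have hlen : (cs.take (m + 1)).length = m + 1 := by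
      simp [List.length_take]; omega
    rw [hlen, lastSp_of_lt _ _ _ _ (by push_cast; omega)]
    exact lastSp_eq_lastSp' _ _ _ _ (by omega)

lemma slice_zero_eq_none (s : String) (b : Int) :
    PySem.Str.slice s (some 0) (some b) = PySem.Str.slice s none (some b) := by
  simp [PySem.Str.slice]

-- ===== VERDICT (by name: the statement is the Claim_ definition above) =====
theorem split_at_space_spec : Claim_equal_split_at_space := by
  intro string max_length _
  unfold Spec_split_at_space split_at_space split_at_space_alt
  simp only [PySem.Str.len_eq]
  by_cases h : (string.toList.length : Int) ≤ max_length
  · rw [if_pos h, if_pos h]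
  · rw [if_neg h, if_neg h]
    rw [pvALoop_eq_pair,
      loops_agree string.toList max_length
        (by omega),
      slice_zero_eq_none]
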